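-- pv_equiv track=rewrite | github.com/dianhuaeven/astrbot_plugin_webnovel_downloader | core/rule_engine.py | _split_cleaners
-- ===== SOURCE A (Python) =====
-- from typing import Any, Dict, Iterable, List, Sequence, Tuple
--
-- def _split_cleaners(rule_text: str) -> Tuple[str, List[Tuple[str, str]]]:
--     if "##" not in rule_text:
--         return rule_text.strip(), []
--     parts: List[str] = []
--     buffer: List[str] = []
--     template_depth = 0
--     index = 0
--     while index < len(rule_text):
--         if rule_text.startswith("{{", index):
--             template_depth += 1
--             buffer.append("{{")
--             index += 2
--             continue
--         if template_depth > 0 and rule_text.startswith("}}", index):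
--             template_depth = max(0, template_depth - 1)
--             buffer.append("}}")
--             index += 2
--             continue
--         if template_depth == 0 and rule_text.startswith("##", index):
--             parts.append("".join(buffer))
--             buffer = []
--             index += 2
--             continue
--         buffer.append(rule_text[index])
--         index += 1
--     parts.append("".join(buffer))
--     base = parts[0].strip()
--     cleaners: List[Tuple[str, str]] = []
--     for index in range(1, len(parts), 2):
--         pattern = parts[index]
--         replacement = parts[index + 1] if index + 1 < len(parts) else ""
--         cleaners.append((pattern, replacement))
--     return base, cleaners
-- ===== SOURCE B (Python) =====
-- def _split_cleaners(rule_text):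
--     if "##" not in rule_text:
--         return rule_text.strip(), []
--     # one pass recording offsets of every top-level '##'
--     bounds = []
--     depth = 0
--     i = 0
--     n = len(rule_text)
--     while i < n:
--         if rule_text.startswith("{{", i):
--             depth += 1
--             i += 2
--         elif depth > 0 and rule_text.startswith("}}", i):
--             depth -= 1
--             i += 2
--         elif depth == 0 and rule_text.startswith("##", i):
--             bounds.append(i)
--             i += 2
--         else:
--             i += 1
--     # second pass: slice the segments out of the original string
--     segments = []
--     prev = 0
--     for b in bounds:
--         segments.append(rule_text[prev:b])
--         prev = b + 2
--     segments.append(rule_text[prev:])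
--     base = segments[0].strip()
--     rest = segments[1:]
--     cleaners = []
--     k = 0
--     while k < len(rest):
--         cleaners.append((rest[k], rest[k + 1] if k + 1 < len(rest) else ""))
--         k += 2
--     return base, cleaners
-- ===== Notes on version B (the rewrite author's own statement) =====
-- stated objective: alternative
-- what changed: Replaces A's single pass that accumulates a character buffer and a parts list with a boundary-offset scan (recording positions of top-level '##') followed by slicing the segments out of the original string and a two-at-a-time pairing pass.
import Mathlib
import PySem

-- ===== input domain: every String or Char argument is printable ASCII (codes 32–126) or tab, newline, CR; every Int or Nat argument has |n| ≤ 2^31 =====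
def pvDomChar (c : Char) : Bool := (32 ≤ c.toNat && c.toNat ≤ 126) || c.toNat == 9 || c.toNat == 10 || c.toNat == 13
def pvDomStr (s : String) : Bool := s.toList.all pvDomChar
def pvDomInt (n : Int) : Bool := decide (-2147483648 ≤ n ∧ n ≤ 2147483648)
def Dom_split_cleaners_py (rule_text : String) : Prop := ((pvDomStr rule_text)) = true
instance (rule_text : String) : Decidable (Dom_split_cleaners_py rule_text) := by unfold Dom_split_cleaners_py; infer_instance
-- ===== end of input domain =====

-- B replaces A's buffer/parts accumulation by a boundary-offset scan plus slicing (objective: simpler second phase, same cost).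

-- ===== PORT A =====
-- A's while loop: one step per index, carrying depth, the current buffer and the parts list.
def pvScanA : List Char → Nat → List Char → List (List Char) → List (List Char)
  | [], _, buf, parts => parts ++ [buf]
  | [c], d, buf, parts => pvScanA [] d (buf ++ [c]) parts
  | c1 :: c2 :: cs, d, buf, parts =>
    if c1 = '{' ∧ c2 = '{' then pvScanA cs (d + 1) (buf ++ ['{', '{']) parts
    else if 0 < d ∧ c1 = '}' ∧ c2 = '}' then pvScanA cs (d - 1) (buf ++ ['}', '}']) parts
    else if d = 0 ∧ c1 = '#' ∧ c2 = '#' then pvScanA cs d [] (parts ++ [buf])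
    else pvScanA (c2 :: cs) d (buf ++ [c1]) parts
termination_by cs => cs.length

def split_cleaners_py (rule_text : String) : String × (List (String × String)) :=
  if PySem.Str.isIn "##" rule_text = false then
    (PySem.Str.strip rule_text, [])
  else
    let parts := pvScanA rule_text.toList 0 [] []
    let base := String.ofList (PySem.Chars.strip (parts.headD []))  -- parts[0]; parts is never empty
    let cleaners := (PySem.List.pyRange 1 (parts.length : Int) 2).foldl
      (fun acc idx =>
        acc ++ [(String.ofList (PySem.List.pyGetD parts idx []),
          if idx + 1 < (parts.length : Int) then String.ofList (PySem.List.pyGetD parts (idx + 1) []) else "")]) []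
    (base, cleaners)

-- ===== PORT B =====
-- B's first pass: record the absolute offsets of every top-level '##' (index loop carried as (rest, i)).
def pvBounds : List Char → Nat → Nat → List Nat
  | [], _, _ => []
  | [_], _, _ => []
  | c1 :: c2 :: cs, d, i =>
    if c1 = '{' ∧ c2 = '{' then pvBounds cs (d + 1) (i + 2)
    else if 0 < d ∧ c1 = '}' ∧ c2 = '}' then pvBounds cs (d - 1) (i + 2)
    else if d = 0 ∧ c1 = '#' ∧ c2 = '#' then i :: pvBounds cs d (i + 2)
    else pvBounds (c2 :: cs) d (i + 1)
termination_by cs => cs.length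

-- B's second pass: slice the segments out of the original text (prev-offset loop).
def pvSegs (t : List Char) : Nat → List Nat → List (List Char)
  | prev, [] => [PySem.List.slice t (some (prev : Int)) none]
  | prev, b :: bs => PySem.List.slice t (some (prev : Int)) (some (b : Int)) :: pvSegs t (b + 2) bs

-- B's pairing loop: two segments at a time, "" for a missing final replacement.
def pvPairs : List (List Char) → List (String × String)
  | [] => []
  | [p] => [(String.ofList p, "")]
  | p :: r :: more => (String.ofList p, String.ofList r) :: pvPairs more

def split_cleaners_py_alt (rule_text : String) : String × (List (String × String)) :=
  if PySem.Str.isIn "##" rule_text = false then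
    (PySem.Str.strip rule_text, [])
  else
    let t := rule_text.toList
    let segs := pvSegs t 0 (pvBounds t 0 0)
    (String.ofList (PySem.Chars.strip (segs.headD [])), pvPairs (segs.drop 1))

-- ===== PRECONDITION & SPEC =====
def Spec_split_cleaners_py (rule_text : String) (out : String × (List (String × String))) : Prop := out = split_cleaners_py_alt rule_text
instance (rule_text : String) (out : String × (List (String × String))) : Decidable (Spec_split_cleaners_py rule_text out) := by unfold Spec_split_cleaners_py; infer_instance

-- ===== CLAIM (what is proved, stated in full; the proofs are below) =====
def Claim_equal_split_cleaners_py : Prop := ∀ (rule_text : String), Dom_split_cleaners_py rule_text → Spec_split_cleaners_py rule_text (split_cleaners_py rule_text)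

-- ===== LEMMAS AND PROOFS =====

theorem pvPyRange_two_nil (a b : Int) (h : b ≤ a) : PySem.List.pyRange a b 2 = [] := by
  rw [PySem.List.pyRange_of_pos a b (by omega)]
  simp [show ¬ a < b by omega]

theorem pvPyRange_two_cons (a b : Int) (h : a < b) :
    PySem.List.pyRange a b 2 = a :: PySem.List.pyRange (a + 2) b 2 := by
  rw [PySem.List.pyRange_of_pos a b (by omega), PySem.List.pyRange_of_pos (a + 2) b (by omega)]
  by_cases h2 : a + 2 < b
  · rw [if_pos h, if_pos h2,
      show ((b - a + 2 - 1) / 2).toNat = ((b - (a + 2) + 2 - 1) / 2).toNat + 1 by omega,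
      List.range_succ_eq_map]
    simp only [List.map_cons, List.map_map]
    congr 1
    · push_cast; ring
    · apply List.map_congr_left
      intro k _
      simp only [Function.comp]
      push_cast
      ring
  · rw [if_pos h, if_neg h2,
      show ((b - a + 2 - 1) / 2).toNat = 1 by omega]
    simp

-- A's index-pair loop over parts equals B's two-at-a-time pairing of the same list.
theorem pvPairsEq (ps : List (List Char)) (k : Nat) (acc : List (String × String)) :
    (PySem.List.pyRange (k : Int) (ps.length : Int) 2).foldl
      (fun acc idx =>
        acc ++ [(String.ofList (PySem.List.pyGetD ps idx []),
          if idx + 1 < (ps.length : Int) then String.ofList (PySem.List.pyGetD ps (idx + 1) []) else "")]) acc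
    = acc ++ pvPairs (ps.drop k) := by
  by_cases hk : ps.length ≤ k
  · rw [pvPyRange_two_nil _ _ (by exact_mod_cast hk)]
    simp [List.drop_eq_nil_of_le hk, pvPairs]
  · push_neg at hk
    rw [pvPyRange_two_cons _ _ (by exact_mod_cast hk)]
    rw [List.foldl_cons]
    rw [show ((k : Int) + 2) = ((k + 2 : Nat) : Int) by push_cast; ring]
    rw [pvPairsEq ps (k + 2)]
    have hx : ps.drop k = ps[k] :: ps.drop (k + 1) := List.drop_eq_getElem_cons hk
    have hgx : ps.getD k [] = ps[k] := by
      simp [List.getD_eq_getElem?_getD, List.getElem?_eq_getElem hk]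
    by_cases hk1 : k + 1 < ps.length
    · have hy : ps.drop (k + 1) = ps[k + 1] :: ps.drop (k + 2) := List.drop_eq_getElem_cons hk1
      have hgy : ps.getD (k + 1) [] = ps[k + 1] := by
        simp [List.getD_eq_getElem?_getD, List.getElem?_eq_getElem hk1]
      rw [hx, hy, pvPairs]
      rw [if_pos (by push_cast; omega), show ((k : Int) + 1) = ((k + 1 : Nat) : Int) by push_cast; ring]
      simp [PySem.List.pyGetD_natCast, List.getD_eq_getElem?_getD,
        List.getElem?_eq_getElem hk, List.getElem?_eq_getElem hk1]
      rw [show ((k : Int) + 1) = ((k + 1 : Nat) : Int) by push_cast; ring, PySem.List.pyGetD_natCast]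
      simp [List.getD_eq_getElem?_getD, List.getElem?_eq_getElem hk1]
    · have hlen : ps.length = k + 1 := by omega
      have hnil : ps.drop (k + 1) = [] := List.drop_eq_nil_of_le (by omega)
      rw [hx, hnil, pvPairs]
      rw [if_neg (by push_cast; omega)]
      have : ps.drop (k + 2) = [] := List.drop_eq_nil_of_le (by omega)
      rw [this, pvPairs]
      simp [PySem.List.pyGetD_natCast, List.getD_eq_getElem?_getD, List.getElem?_eq_getElem hk]
termination_by ps.length - k
decreasing_by omega

theorem pvTakeSnoc (t : List Char) (s i : Nat) (c : Char) (hs : s ≤ i) (hc : t[i]? = some c) :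
    (t.drop s).take (i - s) ++ [c] = (t.drop s).take (i + 1 - s) := by
  rw [show i + 1 - s = (i - s) + 1 by omega, List.take_succ]
  have h : (t.drop s)[i - s]? = some c := by
    rw [List.getElem?_drop, show s + (i - s) = i by omega, hc]
  simp [h]

-- Loop invariant: A's scan from position i (buffer = the text since the last cut at s)
-- produces exactly B's boundary offsets sliced back out of the text.
theorem pvScanEq (t : List Char) : ∀ (n : Nat) (cs : List Char) (d i s : Nat)
    (parts : List (List Char)), cs.length = n → i ≤ t.length → cs = t.drop i → s ≤ i →
    pvScanA cs d ((t.drop s).take (i - s)) parts = parts ++ pvSegs t s (pvBounds cs d i) := by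
  intro n
  induction n using Nat.strong_induction_on with
  | _ n IH =>
  intro cs d i s parts hn hi hcs hs
  have hlen := congrArg List.length hcs
  simp only [List.length_drop] at hlen
  rcases cs with _ | ⟨c1, cs1⟩
  · have hieq : i = t.length := by simp at hlen; omega
    simp only [pvScanA, pvBounds, pvSegs, PySem.List.slice_from_natCast]
    rw [List.take_of_length_le (by simp; omega)]
  · have hc1 : t[i]? = some c1 := by
      have h0 : (t.drop i)[(0 : Nat)]? = t[i + 0]? := List.getElem?_drop
      rw [← hcs] at h0; simpa using h0.symm
    rcases cs1 with _ | ⟨c2, cs2⟩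
    · have hieq : i + 1 = t.length := by simp at hlen; omega
      simp only [pvScanA, pvBounds, pvSegs, PySem.List.slice_from_natCast]
      rw [pvTakeSnoc t s i c1 hs hc1]
      rw [List.take_of_length_le (by simp; omega)]
    · have hc2 : t[i + 1]? = some c2 := by
        have h0 : (t.drop i)[(1 : Nat)]? = t[i + 1]? := List.getElem?_drop
        rw [← hcs] at h0; simpa using h0.symm
      have hd1 : t.drop (i + 1) = c2 :: cs2 := by
        have : t.drop (i + 1) = (t.drop i).drop 1 := by
          rw [List.drop_drop]
        rw [this, ← hcs]; rfl
      have hd2 : t.drop (i + 2) = cs2 := by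
        have : t.drop (i + 2) = (t.drop i).drop 2 := by
          rw [List.drop_drop]
        rw [this, ← hcs]; rfl
      have hi2 : i + 2 ≤ t.length := by simp at hlen; omega
      simp only [pvScanA, pvBounds]
      split_ifs with hb1 hb2 hb3
      · obtain ⟨e1, e2⟩ := hb1
        rw [show (['{', '{'] : List Char) = [c1, c2] by rw [e1, e2],
          show ((t.drop s).take (i - s) ++ [c1, c2]) = ((t.drop s).take (i - s) ++ [c1]) ++ [c2] by simp,
          pvTakeSnoc t s i c1 hs hc1, pvTakeSnoc t s (i + 1) c2 (by omega) hc2,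
          show i + 1 + 1 - s = i + 2 - s by omega]
        exact IH cs2.length (by simp at hn; omega) cs2 (d + 1) (i + 2) s parts rfl hi2 hd2.symm (by omega)
      · obtain ⟨_, e1, e2⟩ := hb2
        rw [show (['}', '}'] : List Char) = [c1, c2] by rw [e1, e2],
          show ((t.drop s).take (i - s) ++ [c1, c2]) = ((t.drop s).take (i - s) ++ [c1]) ++ [c2] by simp,
          pvTakeSnoc t s i c1 hs hc1, pvTakeSnoc t s (i + 1) c2 (by omega) hc2,
          show i + 1 + 1 - s = i + 2 - s by omega]
        exact IH cs2.length (by simp at hn; omega) cs2 (d - 1) (i + 2) s parts rfl hi2 hd2.symm (by omega)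
      · have hrec := IH cs2.length (by simp at hn; omega) cs2 d (i + 2) (i + 2)
          (parts ++ [(t.drop s).take (i - s)]) rfl hi2 hd2.symm (by omega)
        simp only [Nat.sub_self, List.take_zero] at hrec
        rw [hrec, pvSegs, PySem.List.slice_natCast]
        simp
      · rw [pvTakeSnoc t s i c1 hs hc1]
        exact IH (c2 :: cs2).length (by simp at hn ⊢; omega) (c2 :: cs2) d (i + 1) s parts
          rfl (by omega) hd1.symm (by omega)

-- ===== VERDICT (by name: the statement is the Claim_ definition above) =====
theorem split_cleaners_py_spec : Claim_equal_split_cleaners_py := by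
  intro rule_text _
  unfold Spec_split_cleaners_py split_cleaners_py split_cleaners_py_alt
  by_cases h : PySem.Str.isIn "##" rule_text = false
  · rw [if_pos h, if_pos h]
  · rw [if_neg h, if_neg h]
    have hscan := pvScanEq rule_text.toList rule_text.toList.length rule_text.toList 0 0 0 []
      rfl (by omega) (by simp) (by omega)
    simp only [List.drop_zero, List.take_zero, Nat.sub_zero, List.nil_append] at hscan
    simp only [hscan]
    congr 1
    have hp := pvPairsEq (pvSegs rule_text.toList 0 (pvBounds rule_text.toList 0 0)) 1 []
    simp only [Nat.cast_one, List.nil_append] at hp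
    exact hp
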